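-- pv_equiv track=rewrite | github.com/fsardella/TP1-Modelos-y-optimizaci-n-1 | entrega_v2.py | armar_lavados
-- ===== SOURCE A (Python) =====
-- def chequear_incompatibilidad(prenda1, prenda2, incompatibilidades):
--     return (prenda1 in incompatibilidades.keys() and prenda2 in incompatibilidades[prenda1]) or (prenda2 in incompatibilidades.keys() and prenda1 in incompatibilidades[prenda2])
--
-- def armar_lavados(prendas, incompatibilidades):
--     ''' Recibe una lista de prendas y un diccionario que tiene como clave
--         el número de una prenda y como valor una lista con las prendas
--         incompatibles a la misma.
--         Devuelve un diccionario que tiene como clave el número de lavado y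
--         como valor una lista con todas las prendas que entran en el mismo
--         (teniendo en cuenta las restricciones dadas por las incompatibilidades).'''
--     lavados = {}
--     i = 0
--     for prenda in prendas:
--         if len(lavados) == 0:  # si no había ninguna prenda para lavar, no analizo restricciones
--             lavados[i] = [prenda]
--             i += 1
--             continue
--         for n_lavado, prendas_lavado in lavados.items():
--             agregar_prenda = True
--             for prenda_lavado in prendas_lavado:
--                 if chequear_incompatibilidad(prenda_lavado, prenda, incompatibilidades):
--                     # si en el lavado hay una prenda incompatible no se puede agregar al mismo
--                     agregar_prenda = False
--             if agregar_prenda: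
--                 lavados[n_lavado] += [prenda]
--                 break
--         if not agregar_prenda:
--             # no pudo formar parte de ningún lavado existente, creamos uno nuevo
--             lavados[i] = [prenda]
--             i += 1
--     return lavados
-- ===== SOURCE B (Python) =====
-- def armar_lavados(prendas, incompatibilidades):
--     # Precompute a symmetric forbidden-partner set per garment, and keep for each
--     # lavado the union of its members' forbidden sets, so each compatibility
--     # check is a single O(1) set-membership test instead of a scan.
--     forb = {}
--     for p, lst in incompatibilidades.items():
--         for q in lst:
--             forb.setdefault(p, set()).add(q)
--             forb.setdefault(q, set()).add(p)
--     grupos = []  # list of [forbidden_union, members]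
--     for prenda in prendas:
--         f = forb.get(prenda, set())
--         for entry in grupos:
--             if prenda not in entry[0]:
--                 entry[0] |= f
--                 entry[1].append(prenda)
--                 break
--         else:
--             grupos.append([set(f), [prenda]])
--     return {i: members for i, (_, members) in enumerate(grupos)}
-- ===== Notes on version B (the rewrite author's own statement) =====
-- stated objective: faster
-- what changed: B precomputes a symmetric forbidden-partner set per garment once and maintains, for each lavado, the union of its members' forbidden sets, so each lavado compatibility test is one O(1) set-membership test instead of scanning every garment already in the lavado and re-searching the incompatibility lists; the dict-key lavado numbers are assigned by enumerate at the end.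
import Mathlib
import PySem

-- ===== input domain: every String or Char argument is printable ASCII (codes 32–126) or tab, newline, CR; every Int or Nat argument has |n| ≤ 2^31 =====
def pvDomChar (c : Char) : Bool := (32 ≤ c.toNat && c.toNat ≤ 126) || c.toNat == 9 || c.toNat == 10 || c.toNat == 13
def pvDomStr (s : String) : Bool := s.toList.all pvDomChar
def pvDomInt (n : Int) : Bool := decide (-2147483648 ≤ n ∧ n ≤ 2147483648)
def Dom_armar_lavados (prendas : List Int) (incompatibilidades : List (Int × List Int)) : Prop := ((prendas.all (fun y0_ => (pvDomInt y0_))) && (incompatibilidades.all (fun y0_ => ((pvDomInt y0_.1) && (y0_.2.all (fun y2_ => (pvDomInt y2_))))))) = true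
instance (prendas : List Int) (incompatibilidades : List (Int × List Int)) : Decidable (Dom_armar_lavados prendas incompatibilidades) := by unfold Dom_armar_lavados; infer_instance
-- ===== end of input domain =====

-- B precomputes a symmetric forbidden-set per garment and keeps, per lavado, the
-- union of its members' forbidden sets, turning each compatibility check into one
-- set-membership test (objective: faster by a constant/asymptotic mechanism on
-- dense incompatibility inputs).

-- ===== PORT A =====

-- Python dict lookup on the association list (first match).
def lookupInc : List (Int × List Int) → Int → Option (List Int)
  | [], _ => none
  | (k, v) :: rest, x => if k == x then some v else lookupInc rest x

-- chequear_incompatibilidad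
def chequear (prenda1 prenda2 : Int) (incompatibilidades : List (Int × List Int)) : Bool :=
  (match lookupInc incompatibilidades prenda1 with
   | some l => l.contains prenda2
   | none => false) ||
  (match lookupInc incompatibilidades prenda2 with
   | some l => l.contains prenda1
   | none => false)

-- the inner 'for prenda_lavado in prendas_lavado' loop computing agregar_prenda
def flagA (incompatibilidades : List (Int × List Int)) (prenda : Int) (g : List Int) : Bool :=
  g.foldl (fun b m => if chequear m prenda incompatibilidades then false else b) true

-- the 'for n_lavado, prendas_lavado in lavados.items()' scan (stops at the break)
def findLavado (incompatibilidades : List (Int × List Int)) (prenda : Int) :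
    List (Int × List Int) → Option (Int × List Int)
  | [] => none
  | (k, g) :: rest =>
      if flagA incompatibilidades prenda g then some (k, g)
      else findLavado incompatibilidades prenda rest

-- Python dict assignment d[k] = v on the association list: overwrite first match in place, else append.
def dictSet : List (Int × List Int) → Int → List Int → List (Int × List Int)
  | [], k, v => [(k, v)]
  | (k', v') :: rest, k, v => if k' == k then (k, v) :: rest else (k', v') :: dictSet rest k v

def stepA (incompatibilidades : List (Int × List Int))
    (st : List (Int × List Int) × Int) (prenda : Int) : List (Int × List Int) × Int :=
  if st.1.length == 0 then (dictSet st.1 st.2 [prenda], st.2 + 1)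
  else
    match findLavado incompatibilidades prenda st.1 with
    | some (k, g) => (dictSet st.1 k (g ++ [prenda]), st.2)
    | none => (dictSet st.1 st.2 [prenda], st.2 + 1)

def armar_lavados (prendas : List Int) (incompatibilidades : List (Int × List Int)) : List (Int × List Int) :=
  (prendas.foldl (stepA incompatibilidades) ([], 0)).1

-- ===== PORT B =====

-- forb: for p, lst in incompatibilidades.items(): for q in lst: add both directions
def buildForb (incompatibilidades : List (Int × List Int)) : PySem.Dict Int (PySem.Set Int) :=
  incompatibilidades.foldl
    (fun d pl =>
      pl.2.foldl
        (fun d q =>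
          ((d.modify pl.1 PySem.Set.empty (fun s => s.add q)).modify q PySem.Set.empty
            (fun s => s.add pl.1)))
        d)
    PySem.Dict.empty

-- the 'for entry in grupos: … break / else' loop: first group whose forbidden union
-- does not contain prenda gets prenda (and absorbs f); none = for-else fires
def insertB (prenda : Int) (f : PySem.Set Int) :
    List (PySem.Set Int × List Int) → Option (List (PySem.Set Int × List Int))
  | [] => none
  | (b, m) :: rest =>
      if !(PySem.Set.contains b prenda) then some ((PySem.Set.union b f, m ++ [prenda]) :: rest)
      else (insertB prenda f rest).map (fun g => (b, m) :: g)

def stepB (forb : PySem.Dict Int (PySem.Set Int))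
    (grupos : List (PySem.Set Int × List Int)) (prenda : Int) : List (PySem.Set Int × List Int) :=
  let f := forb.getD prenda PySem.Set.empty
  match insertB prenda f grupos with
  | some g => g
  | none => grupos ++ [(f, [prenda])]   -- set(f) is a copy; value-equal to f

def armar_lavados_alt (prendas : List Int) (incompatibilidades : List (Int × List Int)) : List (Int × List Int) :=
  let forb := buildForb incompatibilidades
  let grupos := prendas.foldl (stepB forb) []
  (PySem.List.enumerate grupos 0).map (fun p => (p.1, p.2.2))

-- ===== PRECONDITION & SPEC =====
-- Pre_ excludes association lists whose keys repeat: a Python dict cannot have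
-- duplicate keys, so such inputs never arise from the Python programs and the
-- first-match behaviour of the assoc-list representation there is accidental.
def Pre_armar_lavados (prendas : List Int) (incompatibilidades : List (Int × List Int)) : Prop :=
  (incompatibilidades.map Prod.fst).Nodup
instance (prendas : List Int) (incompatibilidades : List (Int × List Int)) : Decidable (Pre_armar_lavados prendas incompatibilidades) := by unfold Pre_armar_lavados; infer_instance

def pvWitness_armar_lavados : List Int × (List (Int × List Int)) :=
  ([1, 2, 3, 2], [(1, [2]), (3, [1, 2])])

def Spec_armar_lavados (prendas : List Int) (incompatibilidades : List (Int × List Int)) (out : List (Int × List Int)) : Prop := out = armar_lavados_alt prendas incompatibilidades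
instance (prendas : List Int) (incompatibilidades : List (Int × List Int)) (out : List (Int × List Int)) : Decidable (Spec_armar_lavados prendas incompatibilidades out) := by unfold Spec_armar_lavados; infer_instance

-- ===== CLAIM (what is proved, stated in full; the proofs are below) =====
def Claim_equal_armar_lavados : Prop := ∀ (prendas : List Int) (incompatibilidades : List (Int × List Int)), Dom_armar_lavados prendas incompatibilidades → Pre_armar_lavados prendas incompatibilidades → Spec_armar_lavados prendas incompatibilidades (armar_lavados prendas incompatibilidades)

-- ===== LEMMAS AND PROOFS =====

-- the symmetric incompatibility relation as a statement over the raw entries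
def IncRel (inc : List (Int × List Int)) (a b : Int) : Prop :=
  ∃ pl ∈ inc, (pl.1 = a ∧ b ∈ pl.2) ∨ (pl.1 = b ∧ a ∈ pl.2)

-- B's numbering of the groups, as a recursion (equals the enumerate/map in the port)
def num (s : Int) : List (PySem.Set Int × List Int) → List (Int × List Int)
  | [] => []
  | (_, m) :: rest => (s, m) :: num (s + 1) rest

theorem num_eq_enumerate_map (g : List (PySem.Set Int × List Int)) (s : Int) :
    num s g = (PySem.List.enumerate g s).map (fun p => (p.1, p.2.2)) := by
  induction g generalizing s with
  | nil => simp [num, PySem.List.enumerate_nil]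
  | cons hd tl ih => cases hd; simp [num, PySem.List.enumerate_cons, ih]

theorem num_append (s : Int) (g : List (PySem.Set Int × List Int)) (e : PySem.Set Int × List Int) :
    num s (g ++ [e]) = num s g ++ [((s + g.length : Int), e.2)] := by
  induction g generalizing s with
  | nil => cases e; simp [num]
  | cons hd tl ih =>
      cases hd
      simp only [List.cons_append, num, ih, List.length_cons, Nat.cast_add, Nat.cast_one]
      have h : s + 1 + (tl.length : Int) = s + ((tl.length : Int) + 1) := by ring
      rw [h]

theorem dictSet_fresh (g : List (PySem.Set Int × List Int)) (s k : Int) (v : List Int)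
    (h : s + g.length ≤ k) : dictSet (num s g) k v = num s g ++ [(k, v)] := by
  induction g generalizing s with
  | nil => simp [num, dictSet]
  | cons hd tl ih =>
      cases hd
      simp only [num, dictSet, List.length_cons] at *
      have hne : ¬ (s == k) := by simp; omega
      simp [hne]
      exact ih (s + 1) (by omega)

theorem flagA_eq_all (inc : List (Int × List Int)) (p : Int) (g : List Int) :
    flagA inc p g = g.all (fun m => !chequear m p inc) := by
  unfold flagA
  suffices h : ∀ b0 : Bool, g.foldl (fun b m => if chequear m p inc then false else b) b0 =
      (b0 && g.all (fun m => !chequear m p inc)) by simpa using h true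
  induction g with
  | nil => simp
  | cons hd tl ih =>
      intro b0
      simp only [List.foldl_cons, List.all_cons, ih]
      by_cases h : chequear hd p inc <;> simp [h]

theorem mem_getD_double_modify (d : PySem.Dict Int (PySem.Set Int)) (p q m x : Int) :
    x ∈ ((d.modify p PySem.Set.empty (fun s => s.add q)).modify q PySem.Set.empty
          (fun s => s.add p)).getD m PySem.Set.empty ↔
      x ∈ d.getD m PySem.Set.empty ∨ (m = p ∧ x = q) ∨ (m = q ∧ x = p) := by
  simp only [PySem.Dict.getD_modify]
  by_cases hq : m = q <;> by_cases hp : m = p <;> by_cases hpq : q = p <;>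
    simp_all [PySem.Set.mem_add]

theorem mem_inner_fold (p : Int) (lst : List Int) (d : PySem.Dict Int (PySem.Set Int)) (m x : Int) :
    x ∈ (lst.foldl
          (fun d q => ((d.modify p PySem.Set.empty (fun s => s.add q)).modify q PySem.Set.empty
            (fun s => s.add p))) d).getD m PySem.Set.empty ↔
      x ∈ d.getD m PySem.Set.empty ∨ (m = p ∧ x ∈ lst) ∨ (x = p ∧ m ∈ lst) := by
  induction lst generalizing d with
  | nil => simp
  | cons hd tl ih =>
      simp only [List.foldl_cons, ih, mem_getD_double_modify, List.mem_cons]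
      tauto

theorem mem_buildForb (inc : List (Int × List Int)) (m x : Int) :
    x ∈ (buildForb inc).getD m PySem.Set.empty ↔ IncRel inc m x := by
  unfold buildForb IncRel
  suffices h : ∀ d : PySem.Dict Int (PySem.Set Int),
      x ∈ (inc.foldl (fun d pl => pl.2.foldl
            (fun d q => ((d.modify pl.1 PySem.Set.empty (fun s => s.add q)).modify q
              PySem.Set.empty (fun s => s.add pl.1))) d) d).getD m PySem.Set.empty ↔
        x ∈ d.getD m PySem.Set.empty ∨ ∃ pl ∈ inc, (pl.1 = m ∧ x ∈ pl.2) ∨ (pl.1 = x ∧ m ∈ pl.2) by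
    rw [h PySem.Dict.empty]; simp [PySem.Dict.getD_empty, PySem.Set.empty]
  induction inc with
  | nil => intro d; simp
  | cons hd tl ih =>
      intro d
      simp only [List.foldl_cons, ih, mem_inner_fold, List.mem_cons]
      constructor
      · rintro ((h | ⟨h1, h2⟩ | ⟨h1, h2⟩) | ⟨pl, hpl, hc⟩)
        · exact Or.inl h
        · exact Or.inr ⟨hd, Or.inl rfl, Or.inl ⟨h1.symm, h2⟩⟩
        · exact Or.inr ⟨hd, Or.inl rfl, Or.inr ⟨h1.symm, h2⟩⟩
        · exact Or.inr ⟨pl, Or.inr hpl, hc⟩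
      · rintro (h | ⟨pl, (rfl | hpl), hc⟩)
        · exact Or.inl (Or.inl h)
        · rcases hc with ⟨h1, h2⟩ | ⟨h1, h2⟩
          · exact Or.inl (Or.inr (Or.inl ⟨h1.symm, h2⟩))
          · exact Or.inl (Or.inr (Or.inr ⟨h1.symm, h2⟩))
        · exact Or.inr ⟨pl, hpl, hc⟩

theorem lookupInc_some_iff (inc : List (Int × List Int)) (a b : Int)
    (hnd : (inc.map Prod.fst).Nodup) :
    (∃ l, lookupInc inc a = some l ∧ b ∈ l) ↔ ∃ pl ∈ inc, pl.1 = a ∧ b ∈ pl.2 := by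
  induction inc with
  | nil => simp [lookupInc]
  | cons hd tl ih =>
      obtain ⟨k, v⟩ := hd
      simp only [List.map_cons, List.nodup_cons] at hnd
      by_cases hk : k = a
      · subst hk
        simp only [lookupInc, beq_self_eq_true, if_pos]
        constructor
        · rintro ⟨l, hl, hb⟩
          exact ⟨(k, v), List.mem_cons_self, rfl, by cases hl; simpa using hb⟩
        · rintro ⟨pl, hpl, h1, h2⟩
          rcases List.mem_cons.mp hpl with rfl | hpl
          · exact ⟨v, rfl, h2⟩
          · exact absurd (h1 ▸ List.mem_map_of_mem (f := Prod.fst) hpl) hnd.1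
      · have hbe : (k == a) = false := by simpa using hk
        simp only [lookupInc, hbe, Bool.false_eq_true, if_false]
        rw [ih hnd.2]
        constructor
        · rintro ⟨pl, hpl, hc⟩; exact ⟨pl, List.mem_cons_of_mem _ hpl, hc⟩
        · rintro ⟨pl, hpl, h1, h2⟩
          rcases List.mem_cons.mp hpl with rfl | hpl
          · exact absurd h1 hk
          · exact ⟨pl, hpl, h1, h2⟩

theorem chequear_iff_IncRel (inc : List (Int × List Int)) (a b : Int)
    (hnd : (inc.map Prod.fst).Nodup) :
    chequear a b inc = true ↔ IncRel inc a b := by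
  unfold chequear IncRel
  have h1 := lookupInc_some_iff inc a b hnd
  have h2 := lookupInc_some_iff inc b a hnd
  constructor
  · intro h
    rcases Bool.or_eq_true_iff.mp h with h | h
    · rcases hl : lookupInc inc a with _ | l
      · simp [hl] at h
      · obtain ⟨pl, hpl, hc⟩ := h1.mp ⟨l, hl, by simpa [hl] using h⟩
        exact ⟨pl, hpl, Or.inl hc⟩
    · rcases hl : lookupInc inc b with _ | l
      · simp [hl] at h
      · obtain ⟨pl, hpl, hc⟩ := h2.mp ⟨l, hl, by simpa [hl] using h⟩
        exact ⟨pl, hpl, Or.inr hc⟩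
  · rintro ⟨pl, hpl, hc | hc⟩
    · obtain ⟨l, hl, hb⟩ := h1.mpr ⟨pl, hpl, hc⟩
      apply Bool.or_eq_true_iff.mpr; left; simp [hl, hb]
    · obtain ⟨l, hl, hb⟩ := h2.mpr ⟨pl, hpl, hc⟩
      apply Bool.or_eq_true_iff.mpr; right; simp [hl, hb]

-- the invariant on one group
def GrpInv (inc : List (Int × List Int)) (bm : PySem.Set Int × List Int) : Prop :=
  ∀ x, x ∈ bm.1 ↔ ∃ mm ∈ bm.2, IncRel inc mm x

theorem length_num : ∀ (g : List (PySem.Set Int × List Int)) (s : Int), (num s g).length = g.length := by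
  intro g
  induction g with
  | nil => intro s; simp [num]
  | cons hd tl ih => intro s; cases hd; simp [num, ih]

theorem findLavado_ge (inc : List (Int × List Int)) (prenda k : Int) (g : List Int) :
    ∀ (tl : List (PySem.Set Int × List Int)) (s : Int),
      findLavado inc prenda (num s tl) = some (k, g) → s ≤ k := by
  intro tl
  induction tl with
  | nil => intro s h; simp [num, findLavado] at h
  | cons hd tl2 ih =>
      obtain ⟨b, m⟩ := hd
      intro s h
      simp only [num, findLavado] at h
      split at h
      · cases h; omega
      · have := ih (s + 1) h; omega

theorem insertB_length (prenda : Int) (f : PySem.Set Int) :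
    ∀ (l : List (PySem.Set Int × List Int)) (r : List (PySem.Set Int × List Int)),
      insertB prenda f l = some r → r.length = l.length := by
  intro l
  induction l with
  | nil => intro r h; simp [insertB] at h
  | cons hd tl ih =>
      obtain ⟨b, m⟩ := hd
      intro r h
      simp only [insertB] at h
      split at h
      · cases h; simp
      · rcases hrec : insertB prenda f tl with _ | r2
        · rw [hrec] at h; simp at h
        · rw [hrec] at h
          cases h
          simp [ih r2 hrec]

-- the scan correspondence: A's items-scan and B's groups-scan make the same decision
theorem scan_corr (inc : List (Int × List Int)) (prenda : Int) (f : PySem.Set Int)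
    (hf : ∀ x, x ∈ f ↔ IncRel inc prenda x)
    (hnd : (inc.map Prod.fst).Nodup) :
    ∀ (grupos : List (PySem.Set Int × List Int)) (s : Int),
      (∀ bm ∈ grupos, GrpInv inc bm) →
      match insertB prenda f grupos with
      | none => findLavado inc prenda (num s grupos) = none
      | some g' =>
          (∃ k g, findLavado inc prenda (num s grupos) = some (k, g) ∧
            dictSet (num s grupos) k (g ++ [prenda]) = num s g') ∧
          (∀ bm ∈ g', GrpInv inc bm) := by
  intro grupos
  induction grupos with
  | nil => intro s _; simp [insertB, num, findLavado]
  | cons hd tl ih =>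
      obtain ⟨b, m⟩ := hd
      intro s hinv
      have hhd : GrpInv inc (b, m) := hinv _ List.mem_cons_self
      have htl : ∀ bm ∈ tl, GrpInv inc bm := fun bm h => hinv bm (List.mem_cons_of_mem _ h)
      have hflag : flagA inc prenda m = !(PySem.Set.contains b prenda) := by
        rw [flagA_eq_all]
        rcases hc : PySem.Set.contains b prenda with _ | _
        · have hnm : prenda ∉ b := by simpa using hc
          simp only [Bool.not_false, List.all_eq_true]
          intro mm hmm
          simp only [Bool.not_eq_true']
          rcases hch : chequear mm prenda inc with _ | _
          · rfl
          · exact absurd ((hhd prenda).mpr ⟨mm, hmm, (chequear_iff_IncRel inc mm prenda hnd).mp hch⟩) hnm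
        · have hmem : prenda ∈ b := by simpa using hc
          obtain ⟨mm, hmm, hrel⟩ := (hhd prenda).mp hmem
          simp only [Bool.not_true, List.all_eq_false]
          exact ⟨mm, hmm, by rw [(chequear_iff_IncRel inc mm prenda hnd).mpr hrel]; simp⟩
      have hnewinv : ∀ x, x ∈ PySem.Set.union b f ↔ ∃ mm ∈ m ++ [prenda], IncRel inc mm x := by
        intro x
        simp only [PySem.Set.mem_union, List.mem_append, List.mem_singleton]
        constructor
        · rintro (hx | hx)
          · obtain ⟨mm, hmm, hr⟩ := (hhd x).mp hx
            exact ⟨mm, Or.inl hmm, hr⟩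
          · exact ⟨prenda, Or.inr rfl, (hf x).mp hx⟩
        · rintro ⟨mm, hmm | rfl, hr⟩
          · exact Or.inl ((hhd x).mpr ⟨mm, hmm, hr⟩)
          · exact Or.inr ((hf x).mpr hr)
      rcases hc : PySem.Set.contains b prenda with _ | _
      · -- compatible: both place prenda here
        rw [hc] at hflag
        simp only [insertB, hc, Bool.not_false, if_pos, num, findLavado, hflag]
        constructor
        · refine ⟨s, m, rfl, ?_⟩
          simp [dictSet]
        · intro bm hbm
          rcases List.mem_cons.mp hbm with rfl | hbm
          · exact hnewinv
          · exact htl bm hbm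
      · -- incompatible with this group: both skip it
        rw [hc] at hflag
        have h2 := ih (s + 1) htl
        rcases hi : insertB prenda f tl with _ | g'
        · rw [hi] at h2
          simp only [insertB, hc, Bool.not_true, Bool.false_eq_true, if_false, hi,
            Option.map_none, num, findLavado, hflag]
          exact h2
        · rw [hi] at h2
          obtain ⟨⟨k, g, hfind, hset⟩, hginv⟩ := h2
          simp only [insertB, hc, Bool.not_true, Bool.false_eq_true, if_false, hi,
            Option.map_some, num, findLavado, hflag]
          refine ⟨⟨k, g, hfind, ?_⟩, ?_⟩
          · have hk : s + 1 ≤ k := findLavado_ge inc prenda k g tl (s + 1) hfind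
            have hne : (s == k) = false := by simp; omega
            simp [dictSet, hne, hset]
          · intro bm hbm
            rcases List.mem_cons.mp hbm with rfl | hbm
            · exact hhd
            · exact hginv bm hbm

-- the whole-fold invariant
theorem fold_corr (inc : List (Int × List Int)) (hnd : (inc.map Prod.fst).Nodup)
    (prendas : List Int) :
    ∀ (grupos : List (PySem.Set Int × List Int)) (lav : List (Int × List Int)) (i : Int),
      lav = num 0 grupos → i = grupos.length → (∀ bm ∈ grupos, GrpInv inc bm) →
      (prendas.foldl (stepA inc) (lav, i)).1 =
        num 0 (prendas.foldl (stepB (buildForb inc)) grupos) := by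
  induction prendas with
  | nil => intro grupos lav i hlav hi _; simpa using hlav
  | cons p ps ih =>
      intro grupos lav i hlav hi hinv
      have hf : ∀ x, x ∈ (buildForb inc).getD p PySem.Set.empty ↔ IncRel inc p x :=
        fun x => mem_buildForb inc p x
      have hsing : GrpInv inc ((buildForb inc).getD p PySem.Set.empty, [p]) := by
        intro x
        simp only [List.mem_singleton]
        constructor
        · intro hx; exact ⟨p, rfl, (hf x).mp hx⟩
        · rintro ⟨mm, rfl, hr⟩; exact (hf x).mpr hr
      simp only [List.foldl_cons]
      have hlen : lav.length = grupos.length := by rw [hlav, length_num]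
      rcases hg : grupos with _ | ⟨g0, gs⟩
      · -- empty: A takes the len==0 branch, B's insertB is none
        subst hg hlav hi
        apply ih [((buildForb inc).getD p PySem.Set.empty, [p])]
        · simp [dictSet, num]
        · simp
        · intro bm hbm
          rcases List.mem_singleton.mp hbm with rfl
          exact hsing
      · -- nonempty
        subst hg
        have hne : (lav.length == 0) = false := by
          simp [hlen]
        have hsc := scan_corr inc p _ hf hnd (g0 :: gs) 0 hinv
        rcases hiB : insertB p ((buildForb inc).getD p PySem.Set.empty) (g0 :: gs) with _ | g'
        · rw [hiB] at hsc
          have hstepA : stepA inc (lav, i) p = (dictSet lav i [p], i + 1) := by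
            simp only [stepA, hne, Bool.false_eq_true, if_false]
            rw [hlav, hsc]
          have hstepB : stepB (buildForb inc) (g0 :: gs) p =
              (g0 :: gs) ++ [((buildForb inc).getD p PySem.Set.empty, [p])] := by
            simp only [stepB]
            rw [hiB]
          rw [hstepA, hstepB]
          apply ih
          · rw [hlav, hi, dictSet_fresh _ 0 _ _ (by omega), num_append]
            try norm_num
          · rw [hi]; simp [List.length_append]
          · intro bm hbm
            rcases List.mem_append.mp hbm with hbm | hbm
            · exact hinv bm hbm
            · rcases List.mem_singleton.mp hbm with rfl
              exact hsing
        · rw [hiB] at hsc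
          obtain ⟨⟨k, g, hfind, hset⟩, hginv⟩ := hsc
          have hstepA : stepA inc (lav, i) p = (dictSet lav k (g ++ [p]), i) := by
            simp only [stepA, hne, Bool.false_eq_true, if_false]
            rw [hlav, hfind]
          have hstepB : stepB (buildForb inc) (g0 :: gs) p = g' := by
            simp only [stepB]
            rw [hiB]
          rw [hstepA, hstepB]
          apply ih
          · rw [hlav]; exact hset
          · rw [hi, insertB_length p _ _ _ hiB]
          · exact hginv

-- ===== VERDICT (by name: the statement is the Claim_ definition above) =====
theorem armar_lavados_spec : Claim_equal_armar_lavados := by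
  intro prendas inc _ hpre
  unfold Spec_armar_lavados armar_lavados armar_lavados_alt
  rw [fold_corr inc hpre prendas [] [] 0 rfl rfl (by simp)]
  exact num_eq_enumerate_map _ 0
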